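-- pv_equiv track=rewrite | github.com/Emulisy/Leet-code-hot-100 | 1.py | find_remaining
-- ===== SOURCE A (Python) =====
-- def find_remaining(first_line: list, second_line: list) -> int:
--     chicken_num = first_line[1]
--     while chicken_num >= second_line[0]:
--         count = 0
--         for i in range(len(second_line)):
--             if second_line[i] > chicken_num:
--                 break
--             count += 1
--         chicken_num -= count
--     return chicken_num
-- ===== SOURCE B (Python) =====
-- def find_remaining(first_line: list, second_line: list) -> int:
--     v = first_line[1]
--     s0 = second_line[0]
--     while v >= s0:
--         # one scan: c = length of the leading run <= v, m = max of that run
--         c = 1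
--         m = s0
--         while c < len(second_line) and second_line[c] <= v:
--             if second_line[c] > m:
--                 m = second_line[c]
--             c += 1
--         # the count stays c for every value in [m, v]: batch those steps
--         v -= ((v - m) // c + 1) * c
--     return v
-- ===== Notes on version B (the rewrite author's own statement) =====
-- stated objective: alternative
-- what changed: Instead of subtracting the leading-run count once per iteration, B computes the run's length c and prefix maximum m in one scan and batches all iterations with that same count via integer division ((v-m)//c+1), making the iteration count independent of the starting value.
import Mathlib
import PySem

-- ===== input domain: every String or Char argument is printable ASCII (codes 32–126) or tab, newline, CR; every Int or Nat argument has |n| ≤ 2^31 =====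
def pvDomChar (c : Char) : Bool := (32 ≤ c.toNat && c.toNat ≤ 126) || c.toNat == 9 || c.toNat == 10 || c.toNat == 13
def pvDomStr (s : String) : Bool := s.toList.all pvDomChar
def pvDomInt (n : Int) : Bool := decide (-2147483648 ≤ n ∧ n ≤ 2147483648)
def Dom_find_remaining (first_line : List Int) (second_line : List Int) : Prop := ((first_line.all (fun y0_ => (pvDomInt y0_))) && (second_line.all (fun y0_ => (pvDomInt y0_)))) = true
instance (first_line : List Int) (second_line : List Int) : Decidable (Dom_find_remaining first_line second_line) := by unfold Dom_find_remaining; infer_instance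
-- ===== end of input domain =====

-- B batches all of A's constant-count subtraction steps with one integer division, so its iteration count is independent of the starting value.

-- ===== PORT A =====
-- inner for-loop of A: count of leading elements ≤ v (break at the first greater one)
def countLeading (l : List Int) (v : Int) : Int :=
  match l with
  | [] => 0
  | x :: xs => if x > v then 0 else countLeading xs v + 1

theorem countLeading_nonneg (l : List Int) (v : Int) : 0 ≤ countLeading l v := by
  induction l with
  | nil => simp [countLeading]
  | cons x xs ih => simp only [countLeading]; split <;> omega

-- A's while loop; h = second_line[0], (h :: t) = second_line
def aloop (h : Int) (t : List Int) (v : Int) : Int :=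
  if v ≥ h then aloop h t (v - countLeading (h :: t) v) else v
termination_by (v - h + 1).toNat
decreasing_by
  have h1 : countLeading (h :: t) v = countLeading t v + 1 := by
    simp [countLeading]; omega
  have h2 := countLeading_nonneg t v
  omega

def find_remaining (first_line : List Int) (second_line : List Int) : Int :=
  match PySem.List.pyGet? first_line 1, second_line with
  | some v, h :: t => aloop h t v
  | _, _ => 0   -- Python raises IndexError here; excluded by Pre_

-- ===== PORT B =====
-- B's inner while loop over the remaining elements: extends (c, m) = (run length so far, run max so far)
def scanB (xs : List Int) (v : Int) (c : Int) (m : Int) : Int × Int :=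
  match xs with
  | [] => (c, m)
  | x :: t => if x ≤ v then scanB t v (c + 1) (if x > m then x else m) else (c, m)

theorem scanB_c_ge (xs : List Int) (v c m : Int) : c ≤ (scanB xs v c m).1 := by
  induction xs generalizing c m with
  | nil => simp [scanB]
  | cons x t ih =>
    simp only [scanB]; split
    · exact le_trans (by omega) (ih (c + 1) _)
    · simp

theorem scanB_m_le (xs : List Int) (v c m : Int) (hm : m ≤ v) : (scanB xs v c m).2 ≤ v := by
  induction xs generalizing c m with
  | nil => simpa [scanB]
  | cons x t ih =>
    simp only [scanB]; split
    · exact ih (c + 1) _ (by split <;> omega)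
    · simpa [scanB]

def bloop (h : Int) (t : List Int) (v : Int) : Int :=
  if v ≥ h then
    let p := scanB t v 1 h
    bloop h t (v - (PySem.Int.floordiv (v - p.2) p.1 + 1) * p.1)
  else v
termination_by (v - h + 1).toNat
decreasing_by
  rename_i hv
  have hc : 1 ≤ (scanB t v 1 h).1 := scanB_c_ge t v 1 h
  have hm : (scanB t v 1 h).2 ≤ v := scanB_m_le t v 1 h hv
  have hq : 0 ≤ PySem.Int.floordiv (v - (scanB t v 1 h).2) (scanB t v 1 h).1 := by
    rw [PySem.Int.floordiv_eq_ediv_of_pos (by omega)]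
    exact Int.ediv_nonneg (by omega) (by omega)
  have : 1 ≤ (PySem.Int.floordiv (v - (scanB t v 1 h).2) (scanB t v 1 h).1 + 1) * (scanB t v 1 h).1 := by
    nlinarith
  omega

def find_remaining_alt (first_line : List Int) (second_line : List Int) : Int :=
  -- Python raises IndexError on the fall-through branches; excluded by Pre_
  match second_line with
  | [] => 0
  | h :: t =>
    match PySem.List.pyGet? first_line 1 with
    | some v => bloop h t v
    | none => 0

-- ===== PRECONDITION & SPEC =====
-- Pre_ excludes exactly the inputs on which A raises IndexError (first_line shorter than 2, or empty second_line)
def Pre_find_remaining (first_line : List Int) (second_line : List Int) : Prop :=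
  2 ≤ first_line.length ∧ second_line ≠ []
instance (first_line : List Int) (second_line : List Int) : Decidable (Pre_find_remaining first_line second_line) := by unfold Pre_find_remaining; infer_instance

def pvWitness_find_remaining : List Int × List Int := ([0, 10], [2, 3, 7])

def Spec_find_remaining (first_line : List Int) (second_line : List Int) (out : Int) : Prop := out = find_remaining_alt first_line second_line
instance (first_line : List Int) (second_line : List Int) (out : Int) : Decidable (Spec_find_remaining first_line second_line out) := by unfold Spec_find_remaining; infer_instance

-- ===== CLAIM (what is proved, stated in full; the proofs are below) =====
def Claim_equal_find_remaining : Prop := ∀ (first_line : List Int) (second_line : List Int), Dom_find_remaining first_line second_line → Pre_find_remaining first_line second_line → Spec_find_remaining first_line second_line (find_remaining first_line second_line)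

-- ===== LEMMAS AND PROOFS =====

theorem scanB_m_ge (xs : List Int) (v c m : Int) : m ≤ (scanB xs v c m).2 := by
  induction xs generalizing c m with
  | nil => simp [scanB]
  | cons x t ih =>
    simp only [scanB]; split
    · exact le_trans (by split <;> omega) (ih (c + 1) _)
    · simp

-- if every counted element is ≤ the final run-max m' and m' ≤ w ≤ v, then the run at w is the run at v
theorem scanB_count (xs : List Int) (v c m w : Int) (hwv : w ≤ v)
    (hmw : (scanB xs v c m).2 ≤ w) :
    countLeading xs w = (scanB xs v c m).1 - c := by
  induction xs generalizing c m with
  | nil => simp [scanB, countLeading]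
  | cons x t ih =>
    by_cases hx : x ≤ v
    · have hscan : scanB (x :: t) v c m = scanB t v (c + 1) (if x > m then x else m) := by
        simp [scanB, hx]
      rw [hscan] at hmw ⊢
      have hxm : x ≤ (scanB t v (c + 1) (if x > m then x else m)).2 :=
        le_trans (by split <;> omega) (scanB_m_ge t v (c + 1) _)
      have hxw : ¬ x > w := by omega
      simp only [countLeading, if_neg hxw]
      have := ih (c + 1) (if x > m then x else m) hmw
      omega
    · have hxw : x > w := by omega
      simp [scanB, countLeading, hx, hxw]

theorem aloop_eq (h : Int) (t : List Int) (v : Int) (hv : v ≥ h) :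
    aloop h t v = aloop h t (v - countLeading (h :: t) v) := by
  rw [aloop]; simp [hv]

-- batching: k constant-count steps of A
theorem aloop_batch (h : Int) (t : List Int) (v c m : Int) (hv : v ≥ h)
    (hc : scanB t v 1 h = (c, m)) (k : Nat)
    (hk : (k : Int) ≤ PySem.Int.floordiv (v - m) c + 1) :
    aloop h t v = aloop h t (v - k * c) := by
  induction k with
  | zero => simp
  | succ n ih =>
    have hc1 : 1 ≤ c := by have := scanB_c_ge t v 1 h; rw [hc] at this; exact this
    have hm : m ≤ v := by have := scanB_m_le t v 1 h hv; rw [hc] at this; exact this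
    have hmh : h ≤ m := by have := scanB_m_ge t v 1 h; rw [hc] at this; exact this
    have hq : PySem.Int.floordiv (v - m) c * c ≤ v - m := by
      rw [PySem.Int.floordiv_eq_ediv_of_pos (by omega)]
      exact Int.ediv_mul_le _ (by omega)
    have hnk : (n : Int) ≤ PySem.Int.floordiv (v - m) c := by
      have : ((n : Int) + 1) ≤ PySem.Int.floordiv (v - m) c + 1 := by exact_mod_cast hk
      omega
    have hbound : m ≤ v - n * c := by nlinarith
    rw [ih (by omega)]
    have hw : v - n * c ≥ h := by omega
    rw [aloop_eq h t _ hw]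
    have hcount : countLeading (h :: t) (v - n * c) = c := by
      have hhead : ¬ h > v - n * c := by omega
      simp only [countLeading, if_neg hhead]
      have := scanB_count t v 1 h (v - n * c) (by nlinarith) (by rw [hc]; exact hbound)
      rw [hc] at this
      omega
    rw [hcount]
    congr 1
    push_cast
    ring

theorem loop_eq_aux (n : Nat) (h : Int) (t : List Int) (v : Int)
    (hn : (v - h + 1).toNat ≤ n) : aloop h t v = bloop h t v := by
  induction n generalizing v with
  | zero =>
    have hv : ¬ v ≥ h := by omega
    rw [aloop.eq_def, bloop.eq_def]; simp [hv]
  | succ n ih =>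
    by_cases hv : v ≥ h
    · have hc1 : 1 ≤ (scanB t v 1 h).1 := scanB_c_ge t v 1 h
      have hm : (scanB t v 1 h).2 ≤ v := scanB_m_le t v 1 h hv
      set c := (scanB t v 1 h).1 with hcdef
      set m := (scanB t v 1 h).2 with hmdef
      set q := PySem.Int.floordiv (v - m) c with hqdef
      have hq0 : 0 ≤ q := by
        rw [hqdef, PySem.Int.floordiv_eq_ediv_of_pos (by omega)]
        exact Int.ediv_nonneg (by omega) (by omega)
      have hbatch : aloop h t v = aloop h t (v - (q + 1) * c) := by
        have := aloop_batch h t v c m hv (by rw [hcdef, hmdef]) (q + 1).toNat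
          (by rw [← hqdef]; omega)
        rw [this]
        congr 1
        have : ((q + 1).toNat : Int) = q + 1 := by omega
        rw [this]
      have hdec : v - (q + 1) * c < v := by nlinarith
      rw [hbatch, ih (v - (q + 1) * c) (by omega)]
      conv_rhs => rw [bloop.eq_def]
      simp only [if_pos hv, ← hcdef, ← hmdef, ← hqdef]
    · rw [aloop.eq_def, bloop.eq_def]; simp [hv]

theorem loop_eq (h : Int) (t : List Int) (v : Int) : aloop h t v = bloop h t v :=
  loop_eq_aux (v - h + 1).toNat h t v le_rfl

-- ===== VERDICT (by name: the statement is the Claim_ definition above) =====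
theorem find_remaining_spec : Claim_equal_find_remaining := by
  intro first_line second_line _ hpre
  obtain ⟨h1, h2⟩ := hpre
  unfold Spec_find_remaining find_remaining find_remaining_alt
  match first_line, second_line with
  | a :: b :: rest, h :: t =>
    simp [PySem.List.pyGet?, PySem.List.pyIdx?, loop_eq]
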